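-- pv_equiv track=rewrite | github.com/Mecheal-helloworld/Python-shell | py/get_trigger_country.py | getOffset
-- ===== SOURCE A (Python) =====
-- def getOffset(sentence,item):
--     if len(item["text"])==0 :
--         return 0
--     if item["text"] not in sentence:
--         return -1
--     mylist = sentence.split(item["text"])
--     num = len(mylist)
--     offset = 0
--     for i in range(num-1):
--         offset = offset + len(mylist[i])
--     offset = offset + (num - 2) * len(item["text"])
--     return offset
-- ===== SOURCE B (Python) =====
-- def getOffset(sentence, item):
--     text = item["text"]
--     if len(text) == 0:
--         return 0
--     last = -1
--     pos = sentence.find(text)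
--     while pos != -1:
--         last = pos
--         pos = sentence.find(text, pos + len(text))
--     return last
-- ===== Notes on version B (the rewrite author's own statement) =====
-- stated objective: idiomatic
-- what changed: B replaces A's split-the-sentence-and-sum-piece-lengths computation by a direct forward scan with str.find: it repeatedly asks for the next non-overlapping occurrence and remembers the last position found, so no piece list is ever built.
import Mathlib
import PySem

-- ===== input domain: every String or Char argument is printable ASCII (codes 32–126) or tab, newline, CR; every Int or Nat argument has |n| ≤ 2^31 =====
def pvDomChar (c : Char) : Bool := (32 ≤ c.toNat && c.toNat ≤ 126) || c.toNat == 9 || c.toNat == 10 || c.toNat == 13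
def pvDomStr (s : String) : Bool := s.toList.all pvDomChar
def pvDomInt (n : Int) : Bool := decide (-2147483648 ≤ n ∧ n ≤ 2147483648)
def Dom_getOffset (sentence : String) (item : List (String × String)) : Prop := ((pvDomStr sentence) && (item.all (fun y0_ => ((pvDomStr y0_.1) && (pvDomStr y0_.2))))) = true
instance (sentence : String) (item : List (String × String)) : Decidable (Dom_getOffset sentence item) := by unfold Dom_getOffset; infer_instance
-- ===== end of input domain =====

-- B replaces A's split-and-sum-piece-lengths computation by a forward scan with str.find that
-- remembers the last non-overlapping occurrence (idiomatic, no intermediate list).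

-- ===== PORT A =====
def getOffset (sentence : String) (item : List (String × String)) : Int :=
  match (PySem.Dict.ofList item).get? "text" with
  | none => 0   -- unreachable under Pre_ (Python raises KeyError)
  | some text =>
    if PySem.Str.len text = 0 then 0
    else if PySem.Str.isIn text sentence = false then -1
    else
      match PySem.Str.split? sentence text with
      | none => -1   -- unreachable: text ≠ "" here
      | some mylist =>
        let num : Int := mylist.length
        let offset : Int := (PySem.List.pyRange 0 (num - 1) 1).foldl
            (fun off i => off + PySem.Str.len (PySem.List.pyGetD mylist i "")) 0
        offset + (num - 2) * PySem.Str.len text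

-- ===== PORT B =====
-- the 'while pos != -1' loop of Source B; fuel only makes the recursion structural (it never runs out)
def getOffsetLoop (sentence text : String) : Nat → Int → Int → Int
  | 0, _, last => last
  | fuel+1, pos, last =>
    if pos = -1 then last
    else getOffsetLoop sentence text fuel
      (PySem.Str.findFrom sentence text (pos + PySem.Str.len text)) pos

def getOffset_alt (sentence : String) (item : List (String × String)) : Int :=
  match (PySem.Dict.ofList item).get? "text" with
  | none => 0   -- unreachable under Pre_ (Python raises KeyError)
  | some text =>
    if PySem.Str.len text = 0 then 0
    else getOffsetLoop sentence text (sentence.toList.length + 1) (PySem.Str.find sentence text) (-1)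

-- ===== PRECONDITION & SPEC =====
-- Pre_ excludes only dicts without a "text" key, on which Python A raises KeyError.
def Pre_getOffset (sentence : String) (item : List (String × String)) : Prop :=
  ((PySem.Dict.ofList item).get? "text").isSome = true
instance (sentence : String) (item : List (String × String)) : Decidable (Pre_getOffset sentence item) := by unfold Pre_getOffset; infer_instance

def pvWitness_getOffset : String × (List (String × String)) := ("abcb", [("text", "b")])

def Spec_getOffset (sentence : String) (item : List (String × String)) (out : Int) : Prop := out = getOffset_alt sentence item
instance (sentence : String) (item : List (String × String)) (out : Int) : Decidable (Spec_getOffset sentence item out) := by unfold Spec_getOffset; infer_instance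

-- ===== CLAIM (what is proved, stated in full; the proofs are below) =====
def Claim_equal_getOffset : Prop := ∀ (sentence : String) (item : List (String × String)), Dom_getOffset sentence item → Pre_getOffset sentence item → Spec_getOffset sentence item (getOffset sentence item)

-- ===== LEMMAS AND PROOFS =====

-- greedy non-overlapping decomposition: the common shape both programs compute over
def pvSplit (t : List Char) : Nat → List Char → List (List Char)
  | 0, l => [l]
  | fuel+1, l =>
    if PySem.Chars.find l t = -1 then [l]
    else l.take (PySem.Chars.find l t).toNat ::
      pvSplit t fuel (l.drop ((PySem.Chars.find l t).toNat + t.length))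

-- position of the last occurrence in the greedy scan
def pvLast (t : List Char) : Nat → List Char → Int
  | 0, _ => 0
  | fuel+1, l =>
    if PySem.Chars.find (l.drop ((PySem.Chars.find l t).toNat + t.length)) t = -1 then
      PySem.Chars.find l t
    else
      PySem.Chars.find l t + (t.length : Int) +
        pvLast t fuel (l.drop ((PySem.Chars.find l t).toNat + t.length))

theorem pv_findGo_nonneg (sub : List Char) : ∀ (l : List Char) (k : Nat),
    PySem.Chars.find.go sub l k = -1 ∨ (k : Int) ≤ PySem.Chars.find.go sub l k := by
  intro l
  induction l with
  | nil =>
    intro k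
    rw [PySem.Chars.find.go.eq_1]
    split_ifs <;> simp
  | cons c rest ih =>
    intro k
    rw [PySem.Chars.find.go.eq_2]
    split_ifs with h
    · right; exact le_refl _
    · rcases ih (k+1) with h' | h'
      · left; exact h'
      · right
        refine le_trans ?_ h'
        push_cast; omega

theorem pv_findGo_shift (sub : List Char) : ∀ (l : List Char) (k : Nat),
    PySem.Chars.find.go sub l k =
      if PySem.Chars.find.go sub l 0 = -1 then -1
      else (k : Int) + PySem.Chars.find.go sub l 0 := by
  intro l
  induction l with
  | nil =>
    intro k
    rw [PySem.Chars.find.go.eq_1, PySem.Chars.find.go.eq_1]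
    split_ifs <;> simp_all
  | cons c rest ih =>
    intro k
    rw [PySem.Chars.find.go.eq_2, PySem.Chars.find.go.eq_2]
    by_cases h : sub.isPrefixOf (c :: rest) = true
    · simp [h]
    · simp only [if_neg h]
      rw [ih (k+1), ih 1]
      rcases pv_findGo_nonneg sub rest 0 with h0 | h0
      · simp [h0]
      · simp only [Nat.cast_zero] at h0
        have hne : PySem.Chars.find.go sub rest 0 ≠ -1 := by omega
        simp only [if_neg hne]
        have h1 : ¬ (((1:Nat) : Int) + PySem.Chars.find.go sub rest 0 = -1) := by
          push_cast; omega
        rw [if_neg h1]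
        push_cast; ring

theorem pv_find_cons (t : List Char) (c : Char) (rest : List Char) :
    PySem.Chars.find (c :: rest) t =
      if t.isPrefixOf (c :: rest) then 0
      else if PySem.Chars.find rest t = -1 then -1 else 1 + PySem.Chars.find rest t := by
  show PySem.Chars.find.go t (c :: rest) 0 = _
  rw [PySem.Chars.find.go.eq_2]
  have hgr : PySem.Chars.find.go t rest 0 = PySem.Chars.find rest t := rfl
  split_ifs with h h2
  · rfl
  · show PySem.Chars.find.go t rest 1 = -1
    rw [pv_findGo_shift, hgr]
    simp [h2]
  · show PySem.Chars.find.go t rest 1 = 1 + PySem.Chars.find rest t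
    rw [pv_findGo_shift, hgr]
    simp [h2]

theorem pv_find_nonneg_of_ne (l t : List Char) (h : PySem.Chars.find l t ≠ -1) :
    0 ≤ PySem.Chars.find l t := by
  have := PySem.Chars.neg_one_le_find (s := l) (sub := t)
  omega

theorem pv_find_occ_bound (l t : List Char) (h : PySem.Chars.find l t ≠ -1) :
    (PySem.Chars.find l t).toNat + t.length ≤ l.length := by
  have h0 : 0 ≤ PySem.Chars.find l t := pv_find_nonneg_of_ne l t h
  have hspec := PySem.Chars.find_spec (s := l) (sub := t) h0
  have hlen : t.length ≤ (l.drop (PySem.Chars.find l t).toNat).length := hspec.1.length_le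
  have hle := PySem.Chars.find_le_length (s := l) (sub := t)
  simp only [List.length_drop] at hlen
  omega

theorem pv_find_drop_ne (l t : List Char) (n : Nat)
    (h : PySem.Chars.find (l.drop n) t ≠ -1) : PySem.Chars.find l t ≠ -1 := by
  rw [PySem.Chars.find_ne_neg_one_iff] at h ⊢
  exact h.trans (List.drop_suffix n l).isInfix

theorem pv_tlen_pos (t : List Char) (ht : t ≠ []) : 1 ≤ t.length := by
  cases t with
  | nil => exact absurd rfl ht
  | cons a b => simp

theorem pv_find_all_neg (t X : List Char) (ht : t ≠ [])
    (h : ∀ i, i < X.length → ¬ t <+: X.drop i) : PySem.Chars.find X t = -1 := by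
  rw [PySem.Chars.find_eq_neg_one_iff]
  rintro ⟨u, v, rfl⟩
  have ht1 := pv_tlen_pos t ht
  refine h u.length ?_ ?_
  · simp [List.length_append]; omega
  · rw [List.append_assoc, List.drop_left]
    exact ⟨v, rfl⟩

theorem pv_find_append (t p l : List Char) (ht : t ≠ [])
    (h : ∀ i, i < p.length → ¬ t <+: (p ++ l).drop i) :
    PySem.Chars.find (p ++ l) t =
      if PySem.Chars.find l t = -1 then -1 else (p.length : Int) + PySem.Chars.find l t := by
  induction p with
  | nil =>
    simp only [List.nil_append, List.length_nil, Nat.cast_zero, zero_add]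
    split_ifs with hf
    · exact hf
    · rfl
  | cons c p' ih =>
    have h0 : ¬ t <+: (c :: (p' ++ l)) := by
      have := h 0 (by simp)
      simpa using this
    have h0' : ¬ t.isPrefixOf (c :: (p' ++ l)) := by
      rw [List.isPrefixOf_iff_prefix]; exact h0
    rw [List.cons_append, pv_find_cons, if_neg h0']
    have ih' := ih (fun i hi => by
      have := h (i+1) (by simp at hi ⊢; omega)
      simpa using this)
    rw [ih']
    by_cases hf : PySem.Chars.find l t = -1
    · simp [hf]
    · have hn := pv_find_nonneg_of_ne l t hf
      have hge : ¬ ((p'.length : Int) + PySem.Chars.find l t = -1) := by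
        have h0le : (0:Int) ≤ (p'.length : Int) := by positivity
        omega
      rw [if_neg hf, if_neg hf, if_neg hge]
      simp only [List.length_cons]
      push_cast; ring

theorem pvSplit_ne_nil (t : List Char) (fuel : Nat) (l : List Char) :
    pvSplit t fuel l ≠ [] := by
  cases fuel with
  | zero => simp [pvSplit]
  | succ fuel => simp only [pvSplit]; split_ifs <;> simp

theorem pvSplit_fuel (t : List Char) (ht : t ≠ []) : ∀ (fuel fuel' : Nat) (l : List Char),
    l.length < fuel → l.length < fuel' → pvSplit t fuel l = pvSplit t fuel' l := by
  intro fuel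
  induction fuel with
  | zero => intro fuel' l h _; omega
  | succ fuel ih =>
    intro fuel' l h h'
    cases fuel' with
    | zero => omega
    | succ fuel' =>
      simp only [pvSplit]
      split_ifs with hf
      · rfl
      · have ht1 := pv_tlen_pos t ht
        have hb := pv_find_occ_bound l t hf
        have hlen : (l.drop ((PySem.Chars.find l t).toNat + t.length)).length < l.length := by
          simp only [List.length_drop]; omega
        rw [ih fuel' _ (by omega) (by omega)]

theorem pvLast_fuel (t : List Char) (ht : t ≠ []) : ∀ (fuel fuel' : Nat) (l : List Char),
    l.length < fuel → l.length < fuel' → pvLast t fuel l = pvLast t fuel' l := by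
  intro fuel
  induction fuel with
  | zero => intro fuel' l h _; omega
  | succ fuel ih =>
    intro fuel' l h h'
    cases fuel' with
    | zero => omega
    | succ fuel' =>
      simp only [pvLast]
      split_ifs with hf
      · rfl
      · have hne : PySem.Chars.find l t ≠ -1 := pv_find_drop_ne l t _ hf
        have ht1 := pv_tlen_pos t ht
        have hb := pv_find_occ_bound l t hne
        have hlen : (l.drop ((PySem.Chars.find l t).toNat + t.length)).length < l.length := by
          simp only [List.length_drop]; omega
        rw [ih fuel' _ (by omega) (by omega)]

theorem pv_go_eq (t : List Char) (ht : t ≠ []) : ∀ (fuel : Nat) (l cur : List Char) (acc : List (List Char)),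
    l.length ≤ fuel →
    (∀ i, i < cur.length → ¬ t <+: (cur.reverse ++ l).drop i) →
    PySem.Chars.splitOn.go t fuel l cur acc
      = acc.reverse ++ pvSplit t ((cur.reverse ++ l).length + 1) (cur.reverse ++ l) := by
  intro fuel
  induction fuel with
  | zero =>
    intro l cur acc hfuel hcur
    have hl : l = [] := by
      cases l with
      | nil => rfl
      | cons a b => simp at hfuel
    subst hl
    have hfind : PySem.Chars.find (cur.reverse ++ []) t = -1 := by
      apply pv_find_all_neg t _ ht
      intro i hi
      simp only [List.append_nil] at hi ⊢
      rw [List.length_reverse] at hi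
      exact (by simpa using hcur i hi)
    simp only [PySem.Chars.splitOn.go, List.append_nil] at *
    simp only [pvSplit, hfind, if_pos]
    simp
  | succ fuel ih =>
    intro l cur acc hfuel hcur
    cases l with
    | nil =>
      have hfind : PySem.Chars.find (cur.reverse ++ []) t = -1 := by
        apply pv_find_all_neg t _ ht
        intro i hi
        simp only [List.append_nil] at hi ⊢
        rw [List.length_reverse] at hi
        exact (by simpa using hcur i hi)
      simp only [PySem.Chars.splitOn.go, List.append_nil] at *
      simp only [pvSplit, hfind, if_pos]
      simp
    | cons c rest =>
      have ht1 := pv_tlen_pos t ht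
      by_cases hpre : t.isPrefixOf (c :: rest)
      · -- separator matches here
        have hpre' : t <+: (c :: rest) := List.isPrefixOf_iff_prefix.mp hpre
        have hfind0 : PySem.Chars.find (c :: rest) t = 0 := by
          rw [pv_find_cons, if_pos hpre]
        have hgo : PySem.Chars.splitOn.go t (fuel+1) (c :: rest) cur acc
            = PySem.Chars.splitOn.go t fuel ((c :: rest).drop t.length) [] (cur.reverse :: acc) := by
          simp only [PySem.Chars.splitOn.go, hpre]
          simp
        rw [hgo]
        have hsub : ((c :: rest).drop t.length).length ≤ fuel := by
          simp only [List.length_drop, List.length_cons] at *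
          omega
        rw [ih ((c :: rest).drop t.length) [] (cur.reverse :: acc) hsub (by intro i hi; simp at hi)]
        simp only [List.reverse_nil, List.nil_append, List.reverse_cons, List.append_assoc]
        -- RHS: unfold pvSplit on cur.reverse ++ (c::rest)
        have hfap : PySem.Chars.find (cur.reverse ++ (c :: rest)) t = (cur.length : Int) := by
          rw [pv_find_append t cur.reverse (c :: rest) ht (by simpa using hcur)]
          rw [if_neg (by simp [hfind0] : ¬ PySem.Chars.find (c :: rest) t = -1)]
          rw [hfind0, List.length_reverse]; ring
        have hne : ¬ PySem.Chars.find (cur.reverse ++ (c :: rest)) t = -1 := by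
          rw [hfap]; omega
        conv_rhs => rw [pvSplit]
        rw [if_neg hne, hfap]
        have htn : ((cur.length : Int)).toNat = cur.length := by simp
        rw [htn]
        have htake : (cur.reverse ++ (c :: rest)).take cur.length = cur.reverse := by
          have := List.take_left (l₁ := cur.reverse) (l₂ := (c :: rest))
          simpa [List.length_reverse] using this
        have hdrop : (cur.reverse ++ (c :: rest)).drop (cur.length + t.length) = (c :: rest).drop t.length := by
          rw [List.drop_append]
          rw [List.drop_eq_nil_of_le (by rw [List.length_reverse]; omega)]
          rw [List.nil_append, List.length_reverse]
          congr 1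
          omega
        rw [htake, hdrop]
        have hfuels : pvSplit t ((cur.reverse ++ (c :: rest)).length) ((c :: rest).drop t.length)
            = pvSplit t (((c :: rest).drop t.length).length + 1) ((c :: rest).drop t.length) := by
          apply pvSplit_fuel t ht
          · simp only [List.length_append, List.length_reverse, List.length_drop, List.length_cons]
            omega
          · omega
        rw [hfuels]
        simp
      · -- no separator here: shift one char
        have hgo : PySem.Chars.splitOn.go t (fuel+1) (c :: rest) cur acc
            = PySem.Chars.splitOn.go t fuel rest (c :: cur) acc := by
          simp only [PySem.Chars.splitOn.go, hpre]
          simp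
        rw [hgo]
        have hX : (c :: cur).reverse ++ rest = cur.reverse ++ (c :: rest) := by
          simp [List.reverse_cons, List.append_assoc]
        have hnp : ¬ t <+: (c :: rest) := fun hc => hpre (List.isPrefixOf_iff_prefix.mpr hc)
        have hcur' : ∀ i, i < (c :: cur).length → ¬ t <+: (((c :: cur).reverse ++ rest)).drop i := by
          intro i hi
          rw [hX]
          simp only [List.length_cons] at hi
          by_cases hic : i < cur.length
          · exact hcur i hic
          · have hieq : i = cur.length := by omega
            subst hieq
            have hdrop : (cur.reverse ++ (c :: rest)).drop cur.length = c :: rest := by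
              have := List.drop_left (l₁ := cur.reverse) (l₂ := (c :: rest))
              simpa [List.length_reverse] using this
            rw [hdrop]
            exact hnp
        rw [ih rest (c :: cur) acc (by simp at hfuel; omega) hcur']
        rw [hX]

theorem pv_splitOn_eq (s t : List Char) (ht : t ≠ []) :
    PySem.Chars.splitOn s t = pvSplit t (s.length + 1) s := by
  show PySem.Chars.splitOn.go t (s.length + 1) s [] [] = _
  have := pv_go_eq t ht (s.length + 1) s [] [] (by omega) (by intro i hi; simp at hi)
  simpa using this

theorem pv_sum_eq_last (t : List Char) (ht : t ≠ []) : ∀ (fuel : Nat) (l : List Char),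
    l.length < fuel → PySem.Chars.find l t ≠ -1 →
    (((pvSplit t fuel l).take ((pvSplit t fuel l).length - 1)).map (fun p => (p.length : Int))).sum
      + (((pvSplit t fuel l).length : Int) - 2) * (t.length : Int)
      = pvLast t fuel l := by
  intro fuel
  induction fuel with
  | zero => intro l h _; omega
  | succ fuel ih =>
    intro l hlen hne
    have h0 := pv_find_nonneg_of_ne l t hne
    have hb := pv_find_occ_bound l t hne
    have ht1 := pv_tlen_pos t ht
    have hj : ((PySem.Chars.find l t).toNat : Int) = PySem.Chars.find l t := Int.toNat_of_nonneg h0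
    simp only [pvSplit, pvLast, if_neg hne]
    by_cases hf' : PySem.Chars.find (l.drop ((PySem.Chars.find l t).toNat + t.length)) t = -1
    · have hsplit' : pvSplit t fuel (l.drop ((PySem.Chars.find l t).toNat + t.length)) =
          [l.drop ((PySem.Chars.find l t).toNat + t.length)] := by
        cases fuel with
        | zero => rfl
        | succ fuel => simp [pvSplit, hf']
      rw [hsplit', if_pos hf']
      have htk : (l.take (PySem.Chars.find l t).toNat).length = (PySem.Chars.find l t).toNat := by
        simp only [List.length_take]
        omega
      norm_num [htk, hj]
    · have hlen' : (l.drop ((PySem.Chars.find l t).toNat + t.length)).length < fuel := by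
        simp only [List.length_drop]; omega
      have hrec := ih (l.drop ((PySem.Chars.find l t).toNat + t.length)) hlen' hf'
      rw [if_neg hf']
      have hP := pvSplit_ne_nil t fuel (l.drop ((PySem.Chars.find l t).toNat + t.length))
      set P := pvSplit t fuel (l.drop ((PySem.Chars.find l t).toNat + t.length)) with hPdef
      have hP1 : 1 ≤ P.length := List.length_pos_of_ne_nil hP
      have htake : (l.take (PySem.Chars.find l t).toNat :: P).take ((l.take (PySem.Chars.find l t).toNat :: P).length - 1)
          = l.take (PySem.Chars.find l t).toNat :: P.take (P.length - 1) := by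
        simp only [List.length_cons]
        have : P.length + 1 - 1 = (P.length - 1) + 1 := by omega
        rw [this, List.take_succ_cons]
      rw [htake]
      simp only [List.map_cons, List.sum_cons, List.length_cons]
      have htk : (l.take (PySem.Chars.find l t).toNat).length = (PySem.Chars.find l t).toNat := by
        simp only [List.length_take]
        omega
      rw [htk, hj]
      push_cast
      linear_combination hrec

theorem pv_offsum (ps : List String) : ∀ (m : Nat), m ≤ ps.length →
    (PySem.List.pyRange 0 (m : Int) 1).foldl
      (fun off i => off + PySem.Str.len (PySem.List.pyGetD ps i "")) 0
    = ((ps.take m).map PySem.Str.len).sum := by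
  intro m
  induction m with
  | zero =>
    intro _
    rw [show ((0:Nat):Int) = 0 from rfl, PySem.List.pyRange_one_eq_nil (le_refl 0)]
    simp
  | succ m ih =>
    intro hm
    have hm' : m < ps.length := by omega
    have hcast : ((m+1 : Nat) : Int) = (m : Int) + 1 := by push_cast; ring
    rw [hcast, PySem.List.pyRange_one_succ_right (by positivity)]
    rw [List.foldl_append, ih (by omega)]
    simp only [List.foldl_cons, List.foldl_nil]
    have hget : PySem.List.pyGetD ps ((m:Nat):Int) "" = ps[m] := by
      rw [PySem.List.pyGetD_natCast]
      simp [List.getD_eq_getElem?_getD, List.getElem?_eq_getElem hm']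
    have htake : ps.take (m+1) = ps.take m ++ [ps[m]] := by
      rw [List.take_add_one]
      simp [List.getElem?_eq_getElem hm']
    rw [hget, htake, List.map_append, List.sum_append]
    simp

theorem pv_loop_eq (s t : String) (ht : t.toList ≠ []) : ∀ (fuel k : Nat) (last : Int),
    k ≤ s.toList.length → s.toList.length < fuel + k →
    getOffsetLoop s t fuel (PySem.Str.findFrom s t (k : Int)) last =
      if PySem.Chars.find (s.toList.drop k) t.toList = -1 then last
      else (k : Int) + pvLast t.toList ((s.toList.drop k).length + 1) (s.toList.drop k) := by
  intro fuel
  induction fuel with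
  | zero => intro k last h1 h2; omega
  | succ fuel ih =>
    intro k last hk hfuel
    have ht1 := pv_tlen_pos t.toList ht
    have hff : PySem.Str.findFrom s t (k : Int) = PySem.Chars.findFrom s.toList t.toList (k : Int) := by
      simp
    rw [hff, PySem.Chars.findFrom_natCast s.toList t.toList k hk]
    by_cases hf : PySem.Chars.find (s.toList.drop k) t.toList = -1
    · rw [if_pos hf, if_pos hf]
      simp [getOffsetLoop]
    · rw [if_neg hf, if_neg hf]
      have hj0 : 0 ≤ PySem.Chars.find (s.toList.drop k) t.toList :=
        pv_find_nonneg_of_ne _ _ hf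
      have hb := pv_find_occ_bound (s.toList.drop k) t.toList hf
      set j := PySem.Chars.find (s.toList.drop k) t.toList with hjdef
      have hpos : ¬ ((k : Int) + j = -1) := by omega
      simp only [getOffsetLoop, if_neg hpos]
      have hcast : (k : Int) + j + PySem.Str.len t = ((k + j.toNat + t.toList.length : Nat) : Int) := by
        simp only [PySem.Str.len]
        push_cast
        omega
      rw [hcast]
      have hdlen : (s.toList.drop k).length = s.toList.length - k := List.length_drop
      have hk'le : k + j.toNat + t.toList.length ≤ s.toList.length := by omega
      rw [ih (k + j.toNat + t.toList.length) ((k:Int) + j) hk'le (by omega)]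
      have hdd : s.toList.drop (k + j.toNat + t.toList.length)
          = (s.toList.drop k).drop (j.toNat + t.toList.length) := by
        rw [List.drop_drop]
        congr 1
        omega
      rw [hdd]
      -- unfold pvLast on the right once
      conv_rhs => rw [pvLast]
      rw [← hjdef]
      by_cases hf' : PySem.Chars.find ((s.toList.drop k).drop (j.toNat + t.toList.length)) t.toList = -1
      · rw [if_pos hf', if_pos hf']
      · rw [if_neg hf', if_neg hf']
        have hfeq : pvLast t.toList (((s.toList.drop k).drop (j.toNat + t.toList.length)).length + 1)
              ((s.toList.drop k).drop (j.toNat + t.toList.length))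
            = pvLast t.toList ((s.toList.drop k).length)
              ((s.toList.drop k).drop (j.toNat + t.toList.length)) := by
          apply pvLast_fuel t.toList ht
          · omega
          · simp only [List.length_drop]
            omega
        rw [hfeq]
        push_cast [Int.toNat_of_nonneg hj0]
        ring

-- ===== VERDICT (by name: the statement is the Claim_ definition above) =====
theorem getOffset_spec : Claim_equal_getOffset := by
  intro s item hdom hpre
  unfold Pre_getOffset at hpre
  unfold Spec_getOffset getOffset getOffset_alt
  obtain ⟨text, htext⟩ := Option.isSome_iff_exists.mp hpre
  rw [htext]
  by_cases h0 : PySem.Str.len text = 0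
  · simp only [if_pos h0]
  · simp only [if_neg h0]
    have ht : text.toList ≠ [] := by
      intro hc
      apply h0
      simp [PySem.Str.len, hc]
    have ht1 := pv_tlen_pos text.toList ht
    have hfind0 : PySem.Str.find s text = PySem.Str.findFrom s text ((0 : Nat) : Int) := by
      simp [PySem.Str.find]
    have hloop := pv_loop_eq s text ht (s.toList.length + 1) 0 (-1) (by omega) (by omega)
    rw [hfind0] at *
    by_cases hin : PySem.Str.isIn text s = false
    · have hfind : PySem.Chars.find s.toList text.toList = -1 := by
        have : PySem.Chars.isIn text.toList s.toList = false := by simpa [PySem.Str.isIn] using hin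
        simpa [PySem.Chars.isIn, bne] using this
      rw [if_pos hin]
      rw [hloop]
      simp [hfind]
    · have hfind : PySem.Chars.find s.toList text.toList ≠ -1 := by
        have hin' : PySem.Str.isIn text s = true := by
          cases hq : PySem.Str.isIn text s
          · exact absurd hq hin
          · rfl
        have : PySem.Chars.isIn text.toList s.toList = true := by simpa [PySem.Str.isIn] using hin'
        simpa [PySem.Chars.isIn, bne] using this
      rw [if_neg hin, hloop]
      simp only [List.drop_zero, if_neg hfind, Nat.cast_zero, zero_add]
      -- A side
      have hsplit? : PySem.Str.split? s text
          = some ((PySem.Chars.splitOn s.toList text.toList).map String.ofList) := by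
        simp [PySem.Str.split?, PySem.Chars.split?, List.isEmpty_iff, ht]
      rw [hsplit?]
      set pieces := PySem.Chars.splitOn s.toList text.toList with hpiecesdef
      have hpieces : pieces = pvSplit text.toList (s.toList.length + 1) s.toList :=
        pv_splitOn_eq s.toList text.toList ht
      have hPne : pieces ≠ [] := by
        rw [hpieces]; exact pvSplit_ne_nil _ _ _
      have hP1 : 1 ≤ pieces.length := by
        cases hc : pieces with
        | nil => exact absurd hc hPne
        | cons a b => simp
      simp only []
      -- rewrite num - 1 as a Nat cast
      have hnum : ((pieces.map String.ofList).length : Int) - 1 = ((pieces.length - 1 : Nat) : Int) := by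
        simp only [List.length_map]
        push_cast [hP1]
        omega
      rw [hnum, pv_offsum (pieces.map String.ofList) (pieces.length - 1) (by simp)]
      -- turn the String sums into List Char sums
      have hmap : ((pieces.map String.ofList).take (pieces.length - 1)).map PySem.Str.len
          = (pieces.take (pieces.length - 1)).map (fun p => (p.length : Int)) := by
        rw [← List.map_take, List.map_map]
        apply List.map_congr_left
        intro p _
        simp [PySem.Str.len]
      rw [hmap]
      have hlenmap : ((pieces.map String.ofList).length : Int) = (pieces.length : Int) := by simp
      rw [hlenmap]
      have hlen : PySem.Str.len text = (text.toList.length : Int) := rfl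
      rw [hlen]
      rw [hpieces]
      exact pv_sum_eq_last text.toList ht (s.toList.length + 1) s.toList (by omega) hfind
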